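-- pv_equiv track=rewrite | github.com/jeongYuri/coding-test-solution | 프로그래머스/2/67257. ［카카오 인턴］ 수식 최대화/［카카오 인턴］ 수식 최대화.py | solution
-- ===== SOURCE A (Python) =====
-- from itertools import permutations
--
-- def solution(expression):
--     susic = []
--     temp = ""
--     for i in expression:
--         if i.isdigit():
--             temp += i
--         else:
--             if temp:
--                 susic.append(int(temp))
--                 temp = ""
--             susic.append(i)
--     if temp:
--         susic.append(int(temp))
--
--     def calculate(priority, susic):
--         for op in priority:
--             stack = []
--             i = 0
--             while i < len(susic):
--                 if susic[i] == op:
--                     prev = stack.pop()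
--                     next_val = susic[i + 1]
--                     if op == '+':
--                         stack.append(prev + next_val)
--                     elif op == '-':
--                         stack.append(prev - next_val)
--                     elif op == '*':
--                         stack.append(prev * next_val)
--                     i += 1
--                 else:
--                     stack.append(susic[i])
--                 i += 1
--             susic = stack
--         return abs(susic[0])
--
--     operations = ['+', '-', '*']
--     priorities = permutations(operations)
--     max_res = 0
--     for priority in priorities:
--         res = calculate(priority, susic[:])
--         max_res = max(max_res, res)
--
--     return max_res
-- ===== SOURCE B (Python) =====
-- from itertools import permutations
--
-- def solution(expression):
--     tokens = []
--     num = ""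
--     for ch in expression:
--         if ch.isdigit():
--             num += ch
--         else:
--             if num:
--                 tokens.append(int(num))
--                 num = ""
--             tokens.append(ch)
--     if num:
--         tokens.append(int(num))
--
--     def eval_expr(toks, priority):
--         if not priority:
--             return toks[0]
--         op = priority[-1]          # loosest-binding operator: split on it
--         segs = []
--         cur = []
--         for t in toks:
--             if t == op:
--                 segs.append(cur)
--                 cur = []
--             else:
--                 cur.append(t)
--         segs.append(cur)
--         vals = [eval_expr(s, priority[:-1]) for s in segs]
--         res = vals[0]
--         for v in vals[1:]:
--             if op == '+':
--                 res = res + v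
--             elif op == '-':
--                 res = res - v
--             else:
--                 res = res * v
--         return res
--
--     best = 0
--     for pr in permutations(['+', '-', '*']):
--         best = max(best, abs(eval_expr(tokens, list(pr))))
--     return best
-- ===== Notes on version B (the rewrite author's own statement) =====
-- stated objective: alternative
-- what changed: Replaces A's iterative evaluator (three left-to-right stack passes over the token list, one per operator priority) with a recursive divide-and-conquer evaluator that splits the token list at the loosest-binding operator and left-folds the recursively evaluated segments.
-- outside the precondition, e.g. on solution('1a2+3'): A returns 1, B returns 4
import Mathlib
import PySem

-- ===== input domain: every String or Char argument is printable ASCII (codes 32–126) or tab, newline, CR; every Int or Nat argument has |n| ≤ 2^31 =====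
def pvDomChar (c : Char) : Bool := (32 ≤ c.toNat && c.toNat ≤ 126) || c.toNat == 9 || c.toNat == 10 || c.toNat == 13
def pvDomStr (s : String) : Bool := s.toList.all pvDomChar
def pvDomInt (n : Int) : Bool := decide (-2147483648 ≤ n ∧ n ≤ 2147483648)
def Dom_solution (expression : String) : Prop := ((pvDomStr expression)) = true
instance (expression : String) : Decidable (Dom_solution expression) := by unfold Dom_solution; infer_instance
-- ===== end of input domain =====

-- B replaces A's three stack passes per permutation by a recursive split-at-loosest-operator
-- evaluator; equal results on well-formed expressions (Pre_); objective: alternative, same cost.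

-- ===== PORT A =====

-- Heterogeneous Python list of ints and 1-char strings, as a tagged union.
inductive Tok where
  | num : Int → Tok
  | sym : Char → Tok
deriving DecidableEq, Repr

-- int(temp) for a nonempty string of ASCII digits (exact there; temp is always such).
def toInt (l : List Char) : Int := l.foldl (fun a c => 10 * a + ((c.toNat : Int) - 48)) 0

-- the body of A's tokenizing for-loop (state = (susic, temp)); `i.isdigit()` = Char.isDigit on the ASCII domain
def tokStep (st : List Tok × List Char) (c : Char) : List Tok × List Char :=
  if c.isDigit then (st.1, st.2 ++ [c])
  else if st.2 ≠ [] then (st.1 ++ [Tok.num (toInt st.2), Tok.sym c], [])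
  else (st.1 ++ [Tok.sym c], [])

def tokenize (s : List Char) : List Tok :=
  let st := s.foldl tokStep ([], [])
  if st.2 ≠ [] then st.1 ++ [Tok.num (toInt st.2)] else st.1

-- A's if op=='+'/'-'/'*' chain (only ever called with op ∈ "+-*")
def applyOp (op : Char) (a b : Int) : Int :=
  if op = '+' then a + b else if op = '-' then a - b else if op = '*' then a * b else a

-- A's inner while-loop; stack is kept top-first (Python appends/pops at the right end).
-- `none` = the Python raises there (pop from empty stack, susic[i+1] IndexError, str operand TypeError).
def goPass (op : Char) (stack : List Tok) : List Tok → Option (List Tok)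
  | [] => some stack
  | t :: rest =>
    if t = Tok.sym op then
      match stack, rest with
      | Tok.num prev :: st, Tok.num nv :: rest' =>
          goPass op (Tok.num (applyOp op prev nv) :: st) rest'
      | _, _ => none
    else goPass op (t :: stack) rest

def onePass (op : Char) (susic : List Tok) : Option (List Tok) :=
  (goPass op [] susic).map List.reverse

-- A's calculate: one pass per operator in priority order, then abs(susic[0]).
def calculate (priority : List Char) (susic : List Tok) : Option Int :=
  match priority.foldl (fun acc op => acc.bind (onePass op)) (some susic) with
  | some (Tok.num v :: _) => some |v|
  | _ => none

-- itertools.permutations(['+','-','*']) in its order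
def permsA : List (List Char) :=
  [['+','-','*'], ['+','*','-'], ['-','+','*'], ['-','*','+'], ['*','+','-'], ['*','-','+']]

-- where the Python raises, calculate = none and we take 0 (such inputs are outside Pre_)
def solution (expression : String) : Int :=
  let susic := tokenize expression.toList
  permsA.foldl (fun m p => max m ((calculate p susic).getD 0)) 0

-- ===== PORT B =====

-- Source B's segment-splitting for-loop (state = (segs, cur)), plus the trailing segs.append(cur)
def splitStep (op : Char) (st : List (List Tok) × List Tok) (t : Tok) : List (List Tok) × List Tok :=
  if t = Tok.sym op then (st.1 ++ [st.2], []) else (st.1, st.2 ++ [t])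

def splitToks (op : Char) (toks : List Tok) : List (List Tok) :=
  let st := toks.foldl (splitStep op) ([], [])
  st.1 ++ [st.2]

-- Source B's eval_expr: split at priority[-1], recurse with priority[:-1], left-fold segment values.
-- toks[0] at the base: a stray non-int there raises in Python (outside Pre_); we return 0.
def evalE (toks : List Tok) (priority : List Char) : Int :=
  match priority with
  | [] => match toks with | Tok.num v :: _ => v | _ => 0
  | p :: ps =>
    let op := (p :: ps).getLast (by simp)
    let vals := (splitToks op toks).map (fun s => evalE s (p :: ps).dropLast)
    match vals with
    | [] => 0
    | v :: vs => vs.foldl (fun a b => applyOp op a b) v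
termination_by priority.length
decreasing_by simp

def solution_alt (expression : String) : Int :=
  let tokens := tokenize expression.toList
  permsA.foldl (fun m p => max m |evalE tokens p|) 0

-- ===== PRECONDITION & SPEC =====

-- grammar check: digits (op digits)* followed by an optional inert junk tail (no +,-,* in it);
-- expectNum = still expecting (the start of) a number
def noOps (l : List Char) : Bool := l.all (fun c => !decide (c ∈ ['+', '-', '*']))

def okE (expectNum : Bool) : List Char → Bool
  | [] => !expectNum
  | c :: r =>
    if c.isDigit then okE false r
    else if expectNum then false
    else if decide (c ∈ ['+', '-', '*']) then okE true r
    else noOps r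

-- Pre_ restricts to the task's natural domain: a well-formed expression (digit runs alternating
-- with operator characters plus, minus, times), optionally followed by inert junk (no further +,-,* after the first
-- stray character). On other strings A may raise (empty-stack pop, IndexError, str-operand
-- TypeError) or return an accidental value from leftover stray tokens interleaved with operators.
def Pre_solution (expression : String) : Prop := okE true expression.toList = true
instance (expression : String) : Decidable (Pre_solution expression) := by unfold Pre_solution; infer_instance

def pvWitness_solution : String := "100-200*300-500+20"

def Spec_solution (expression : String) (out : Int) : Prop := out = solution_alt expression
instance (expression : String) (out : Int) : Decidable (Spec_solution expression out) := by unfold Spec_solution; infer_instance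

-- ===== CLAIM (what is proved, stated in full; the proofs are below) =====
def Claim_equal_solution : Prop := ∀ (expression : String), Dom_solution expression → Pre_solution expression → Spec_solution expression (solution expression)

-- ===== LEMMAS AND PROOFS =====

-- chain representation: an alternating token list is a head value plus (operator, value) pairs
def tailL : List (Char × Int) → List Tok
  | [] => []
  | (o, w) :: t => Tok.sym o :: Tok.num w :: tailL t

def listify (v : Int) (l : List (Char × Int)) : List Tok := Tok.num v :: tailL l

-- spec of one of A's passes on a chain
def red (q : Char) (v : Int) : List (Char × Int) → Int × List (Char × Int)
  | [] => (v, [])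
  | (o, w) :: t =>
    if o = q then red q (applyOp q v w) t
    else ((v, (o, (red q w t).1) :: (red q w t).2) : Int × List (Char × Int))

def redAll (P : List Char) (c : Int × List (Char × Int)) : Int × List (Char × Int) :=
  P.foldl (fun c q => red q c.1 c.2) c

-- segments of a chain at occurrences of op, and their re-joining
def seg (op : Char) (v : Int) : List (Char × Int) → (Int × List (Char × Int)) × List (Int × List (Char × Int))
  | [] => ((v, []), [])
  | (o, w) :: t =>
    let s := seg op w t
    if o = op then ((v, []), s.1 :: s.2)
    else ((v, (o, s.1.1) :: s.1.2), s.2)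

def glue (op : Char) (c : Int × List (Char × Int)) : List (Int × List (Char × Int)) → Int × List (Char × Int)
  | [] => c
  | d :: ds => (c.1, c.2 ++ (op, (glue op d ds).1) :: (glue op d ds).2)

-- Bool shape check for alternating token lists
def isChain : List Tok → Bool
  | [Tok.num _] => true
  | Tok.num _ :: Tok.sym o :: rest => decide (o ∈ ['+', '-', '*']) && isChain rest
  | _ => false

theorem goPass_num (q : Char) (x : Int) (stack r : List Tok) :
    goPass q stack (Tok.num x :: r) = goPass q (Tok.num x :: stack) r := by
  rw [goPass.eq_def]; simp

theorem goPass_sym_ne (q o : Char) (ho : o ≠ q) (stack r : List Tok) :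
    goPass q stack (Tok.sym o :: r) = goPass q (Tok.sym o :: stack) r := by
  rw [goPass.eq_def]; simp [ho]

theorem goPass_match (q : Char) (prev nv : Int) (st r : List Tok) :
    goPass q (Tok.num prev :: st) (Tok.sym q :: Tok.num nv :: r) =
      goPass q (Tok.num (applyOp q prev nv) :: st) r := by
  rw [goPass.eq_def]; simp

def InertP (J : List Tok) : Prop := ∀ c, Tok.sym c ∈ J → c ∉ (['+', '-', '*'] : List Char)

theorem goPass_inert (q : Char) : ∀ (J : List Tok), (∀ t ∈ J, t ≠ Tok.sym q) →
    ∀ stack, goPass q stack J = some (J.reverse ++ stack) := by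
  intro J
  induction J with
  | nil => intro _ stack; simp [goPass]
  | cons t J' ih =>
    intro h stack
    cases t with
    | num x =>
      rw [goPass_num, ih (fun u hu => h u (by simp [hu]))]
      simp
    | sym c =>
      have hc : c ≠ q := by
        intro hc
        subst hc
        exact h (Tok.sym c) (by simp) rfl
      rw [goPass_sym_ne q c hc, ih (fun u hu => h u (by simp [hu]))]
      simp

theorem goPass_listifyJ (q : Char) (J : List Tok) (hJ : ∀ t ∈ J, t ≠ Tok.sym q) :
    ∀ (l : List (Char × Int)) (v : Int) (stack : List Tok),
    goPass q stack (listify v l ++ J) =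
      some ((listify (red q v l).1 (red q v l).2 ++ J).reverse ++ stack) := by
  intro l
  induction l with
  | nil =>
    intro v stack
    rw [show listify v [] ++ J = Tok.num v :: J from by simp [listify, tailL]]
    rw [goPass_num, goPass_inert q J hJ]
    simp [red, listify, tailL]
  | cons p t ih =>
    obtain ⟨o, w⟩ := p
    intro v stack
    by_cases ho : o = q
    · subst ho
      have h2 := ih (applyOp o v w) stack
      rw [listify] at h2
      rw [List.cons_append, goPass_num] at h2
      rw [show listify v ((o, w) :: t) ++ J =
          Tok.num v :: Tok.sym o :: Tok.num w :: (tailL t ++ J) from by simp [listify, tailL]]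
      rw [goPass_num, goPass_match, h2]
      simp [red]
    · rw [show listify v ((o, w) :: t) ++ J =
          Tok.num v :: Tok.sym o :: (listify w t ++ J) from by simp [listify, tailL]]
      rw [goPass_num, goPass_sym_ne q o ho]
      have h2 := ih w (Tok.sym o :: Tok.num v :: stack)
      rw [listify, List.cons_append, goPass_num] at h2
      rw [show listify w t ++ J = Tok.num w :: (tailL t ++ J) from by simp [listify]]
      rw [goPass_num, h2]
      simp [red, ho, listify, tailL]

theorem onePass_listifyJ (q : Char) (J : List Tok) (hJ : ∀ t ∈ J, t ≠ Tok.sym q)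
    (v : Int) (l : List (Char × Int)) :
    onePass q (listify v l ++ J) = some (listify (red q v l).1 (red q v l).2 ++ J) := by
  simp [onePass, goPass_listifyJ q J hJ]

theorem inertP_ne_sym (J : List Tok) (hJ : InertP J) (q : Char)
    (hq : q ∈ (['+', '-', '*'] : List Char)) : ∀ t ∈ J, t ≠ Tok.sym q := by
  intro t ht
  cases t with
  | num x => simp
  | sym c =>
    intro hc
    cases hc
    exact hJ q ht hq

theorem passes_listifyJ (P : List Char) : ∀ (v : Int) (l : List (Char × Int)) (J : List Tok),
    (∀ q ∈ P, q ∈ (['+', '-', '*'] : List Char)) → InertP J →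
    (P.foldl (fun acc op => acc.bind (onePass op)) (some (listify v l ++ J))) =
      some (listify (redAll P (v, l)).1 (redAll P (v, l)).2 ++ J) := by
  induction P with
  | nil => intro v l J _ _; simp [redAll]
  | cons q Q ih =>
    intro v l J hP hJ
    have hstep : (some (listify v l ++ J)).bind (onePass q) =
        some (listify (red q v l).1 (red q v l).2 ++ J) := by
      simp [onePass_listifyJ q J (inertP_ne_sym J hJ q (hP q (by simp)))]
    simp only [List.foldl_cons, hstep,
      ih (red q v l).1 (red q v l).2 J (fun q' hq' => hP q' (by simp [hq'])) hJ]
    simp [redAll]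

theorem calculate_listifyJ (P : List Char) (v : Int) (l : List (Char × Int)) (J : List Tok)
    (hP : ∀ q ∈ P, q ∈ (['+', '-', '*'] : List Char)) (hJ : InertP J) :
    calculate P (listify v l ++ J) = some |(redAll P (v, l)).1| := by
  rw [calculate, passes_listifyJ P v l J hP hJ]
  rw [show listify (redAll P (v, l)).1 (redAll P (v, l)).2 ++ J =
      Tok.num (redAll P (v, l)).1 :: (tailL (redAll P (v, l)).2 ++ J) from by simp [listify]]

theorem red_append (q op : Char) (hq : q ≠ op) : ∀ (l1 : List (Char × Int)) (v w : Int) (l2 : List (Char × Int)),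
    red q v (l1 ++ (op, w) :: l2) =
      ((red q v l1).1, (red q v l1).2 ++ (op, (red q w l2).1) :: (red q w l2).2) := by
  intro l1
  induction l1 with
  | nil =>
    intro v w l2
    simp [red, hq.symm]
  | cons p t ih =>
    obtain ⟨o, u⟩ := p
    intro v w l2
    by_cases ho : o = q
    · subst ho
      simp only [List.cons_append, red, if_pos rfl, ite_true, eq_self_iff_true, ih]
    · simp only [List.cons_append, red, if_neg ho, ih]

theorem red_glue (q op : Char) (hq : q ≠ op) : ∀ (cs : List (Int × List (Char × Int))) (c : Int × List (Char × Int)),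
    red q (glue op c cs).1 (glue op c cs).2 =
      glue op (red q c.1 c.2) (cs.map (fun d => red q d.1 d.2)) := by
  intro cs
  induction cs with
  | nil => intro c; simp [glue]
  | cons d ds ih =>
    intro c
    simp only [glue, List.map_cons]
    rw [red_append q op hq]
    simp [ih d]

theorem redAll_glue (Q : List Char) (op : Char) (hq : op ∉ Q) : ∀ (c : Int × List (Char × Int)) (cs : List (Int × List (Char × Int))),
    redAll Q (glue op c cs) = glue op (redAll Q c) (cs.map (redAll Q)) := by
  induction Q with
  | nil =>
    intro c cs
    rw [show (redAll ([] : List Char)) = id from rfl, List.map_id]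
    rfl
  | cons q Q' ih =>
    intro c cs
    have hqop : q ≠ op := fun h => hq (h ▸ List.mem_cons_self)
    have hop' : op ∉ Q' := fun h => hq (List.mem_cons_of_mem _ h)
    simp only [redAll, List.foldl_cons]
    rw [red_glue q op hqop cs c]
    have := ih hop' (red q c.1 c.2) (cs.map (fun d => red q d.1 d.2))
    simp only [redAll] at this
    rw [this, List.map_map]
    rfl

theorem glue_seg (op : Char) : ∀ (l : List (Char × Int)) (v : Int),
    glue op (seg op v l).1 (seg op v l).2 = (v, l) := by
  intro l
  induction l with
  | nil => intro v; simp [seg, glue]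
  | cons p t ih =>
    obtain ⟨o, w⟩ := p
    intro v
    by_cases ho : o = op
    · subst ho
      simp only [seg, if_pos rfl, ite_true, eq_self_iff_true, glue]
      rw [ih w]
      simp
    · simp only [seg, if_neg ho]
      have hglue := ih w
      cases hs : (seg op w t).2 with
      | nil =>
        rw [hs] at hglue
        simp only [glue] at hglue ⊢
        rw [Prod.ext_iff] at hglue
        dsimp only at hglue
        simp [hglue.1, hglue.2]
      | cons d ds =>
        rw [hs] at hglue
        simp only [glue] at hglue ⊢
        rw [Prod.ext_iff] at hglue ⊢
        dsimp only at hglue ⊢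
        exact ⟨rfl, by rw [hglue.1]; simp [hglue.2]⟩

theorem red_ops (q : Char) : ∀ (l : List (Char × Int)) (v : Int) (o : Char),
    o ∈ (red q v l).2.map Prod.fst → o ∈ l.map Prod.fst ∧ o ≠ q := by
  intro l
  induction l with
  | nil => intro v o h; simp [red] at h
  | cons p t ih =>
    obtain ⟨o', w⟩ := p
    intro v o h
    by_cases ho : o' = q
    · subst ho
      simp only [red, if_pos rfl, ite_true, eq_self_iff_true] at h
      have := ih (applyOp o' v w) o h
      exact ⟨List.mem_cons_of_mem _ this.1, this.2⟩
    · simp only [red, if_neg ho, List.map_cons, List.mem_cons] at h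
      rcases h with h | h
      · subst h; exact ⟨List.mem_cons_self, ho⟩
      · have := ih w o h
        exact ⟨List.mem_cons_of_mem _ this.1, this.2⟩

theorem redAll_nil (Q : List Char) : ∀ (l : List (Char × Int)) (v : Int),
    (∀ o ∈ l.map Prod.fst, o ∈ Q) → (redAll Q (v, l)).2 = [] := by
  induction Q with
  | nil =>
    intro l v h
    cases l with
    | nil => simp [redAll]
    | cons p t => exact absurd (h p.1 (by simp)) (by simp)
  | cons q Q' ih =>
    intro l v h
    simp only [redAll, List.foldl_cons]
    have h2 : ∀ o ∈ (red q v l).2.map Prod.fst, o ∈ Q' := by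
      intro o ho
      have := red_ops q l v o ho
      rcases h o this.1 with h3
      simp only [List.mem_cons] at h3
      rcases h3 with h3 | h3
      · exact absurd h3 this.2
      · exact h3
    have := ih (red q v l).2 (red q v l).1 h2
    simpa [redAll] using this

theorem glue_flat (op : Char) : ∀ (ds : List (Int × List (Char × Int))) (v : Int),
    (∀ d ∈ ds, d.2 = ([] : List (Char × Int))) →
    glue op (v, []) ds = (v, ds.map (fun d => (op, d.1))) := by
  intro ds
  induction ds with
  | nil => intro v h; simp [glue]
  | cons d ds' ih =>
    intro v h
    simp only [glue, List.map_cons]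
    have hd : d.2 = [] := h d (by simp)
    have := ih d.1 (fun e he => h e (List.mem_cons_of_mem _ he))
    rw [← hd] at this
    rw [show (d.1, d.2) = d from rfl] at this
    rw [this]
    simp

theorem red_op_fold (op : Char) : ∀ (vs : List Int) (v : Int),
    red op v (vs.map (fun w => (op, w))) = (vs.foldl (applyOp op) v, []) := by
  intro vs
  induction vs with
  | nil => intro v; simp [red]
  | cons w ws ih =>
    intro v
    simp only [List.map_cons, red, if_pos rfl, ite_true, eq_self_iff_true, ih, List.foldl_cons]

theorem seg_ops (op : Char) : ∀ (l : List (Char × Int)) (v : Int) (c : Int × List (Char × Int)),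
    c ∈ (seg op v l).1 :: (seg op v l).2 →
    ∀ o ∈ c.2.map Prod.fst, o ∈ l.map Prod.fst ∧ o ≠ op := by
  intro l
  induction l with
  | nil => intro v c hc o ho; simp [seg] at hc; simp [hc] at ho
  | cons p t ih =>
    obtain ⟨o', w⟩ := p
    intro v c hc o ho
    by_cases h' : o' = op
    · subst h'
      simp only [seg, if_pos rfl, ite_true, eq_self_iff_true, List.mem_cons] at hc
      rcases hc with hc | hc
      · simp [hc] at ho
      · have := ih w c (by simpa using hc) o ho
        exact ⟨List.mem_cons_of_mem _ this.1, this.2⟩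
    · simp only [seg, if_neg h', List.mem_cons] at hc
      rcases hc with hc | hc
      · subst hc
        simp only [List.map_cons, List.mem_cons] at ho
        rcases ho with ho | ho
        · exact ⟨by simp [ho], by simp [ho, h']⟩
        · have := ih w ((seg op w t).1) (by simp) o (by simpa using ho)
          exact ⟨List.mem_cons_of_mem _ this.1, this.2⟩
      · have := ih w c (by simp [hc]) o ho
        exact ⟨List.mem_cons_of_mem _ this.1, this.2⟩

def splitR (op : Char) : List Tok → List (List Tok)
  | [] => [[]]
  | t :: rest =>
    if t = Tok.sym op then [] :: splitR op rest
    else (splitR op rest).modifyHead (fun s => t :: s)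

theorem splitR_ne_nil (op : Char) : ∀ (T : List Tok), splitR op T ≠ [] := by
  intro T
  cases T with
  | nil => simp [splitR]
  | cons t rest =>
    simp only [splitR]
    split
    · simp
    · cases h : splitR op rest with
      | nil => exact absurd h (splitR_ne_nil op rest)
      | cons a as => simp

theorem foldl_splitStep (op : Char) : ∀ (T : List Tok) (segs : List (List Tok)) (cur : List Tok),
    (T.foldl (splitStep op) (segs, cur)).1 ++ [(T.foldl (splitStep op) (segs, cur)).2] =
      segs ++ (splitR op T).modifyHead (fun s => cur ++ s) := by
  intro T
  induction T with
  | nil => intro segs cur; simp [splitR]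
  | cons t rest ih =>
    intro segs cur
    by_cases ht : t = Tok.sym op
    · simp only [List.foldl_cons, splitStep, if_pos ht, splitR, ht, ite_true, eq_self_iff_true]
      rw [ih]
      cases h : splitR op rest with
      | nil => exact absurd h (splitR_ne_nil op rest)
      | cons a as => simp
    · simp only [List.foldl_cons, splitStep, if_neg ht, splitR, ite_false, eq_self_iff_true]
      rw [ih]
      cases h : splitR op rest with
      | nil => exact absurd h (splitR_ne_nil op rest)
      | cons a as => simp [ht]

theorem splitToks_splitR (op : Char) (T : List Tok) : splitToks op T = splitR op T := by
  have := foldl_splitStep op T [] []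
  simp only [List.nil_append] at this
  rw [splitToks]
  rw [this]
  cases h : splitR op T with
  | nil => exact absurd h (splitR_ne_nil op T)
  | cons a as => simp

theorem splitR_listify (op : Char) : ∀ (l : List (Char × Int)) (v : Int),
    splitR op (listify v l) =
      listify (seg op v l).1.1 (seg op v l).1.2 ::
        (seg op v l).2.map (fun c => listify c.1 c.2) := by
  intro l
  induction l with
  | nil => intro v; simp [listify, tailL, splitR, seg]
  | cons p t ih =>
    obtain ⟨o, w⟩ := p
    intro v
    have hlist : listify v ((o, w) :: t) = Tok.num v :: Tok.sym o :: listify w t := by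
      simp [listify, tailL]
    rw [hlist]
    by_cases ho : o = op
    · subst ho
      simp only [splitR, ite_true, eq_self_iff_true, if_pos rfl, ih w,
        List.modifyHead_cons, reduceCtorEq, if_neg]
      simp [seg, listify, tailL]
    · have hsym : Tok.sym o ≠ Tok.sym op := by simp [ho]
      simp only [splitR, if_neg hsym, ih w, List.modifyHead_cons, reduceCtorEq, if_neg]
      simp [seg, ho, listify, tailL]

theorem evalE_cons (T : List Tok) (p : Char) (ps : List Char) :
    evalE T (p :: ps) =
      (match (splitToks ((p :: ps).getLast (by simp)) T).map
          (fun s => evalE s (p :: ps).dropLast) with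
       | [] => 0
       | v :: vs => vs.foldl (fun a b => applyOp ((p :: ps).getLast (by simp)) a b) v) := by
  rw [evalE]

def appLast (J : List Tok) : List (List Tok) → List (List Tok)
  | [] => [J]
  | [x] => [x ++ J]
  | x :: y :: xs => x :: appLast J (y :: xs)

theorem splitR_inert (op : Char) : ∀ (J : List Tok), (∀ t ∈ J, t ≠ Tok.sym op) →
    splitR op J = [J] := by
  intro J
  induction J with
  | nil => simp [splitR]
  | cons t J' ih =>
    intro h
    have ht : t ≠ Tok.sym op := h t (by simp)
    simp [splitR, ht, ih (fun u hu => h u (by simp [hu]))]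

theorem modifyHead_appLast (J : List Tok) (t : Tok) : ∀ (L : List (List Tok)), L ≠ [] →
    (appLast J L).modifyHead (fun s => t :: s) =
      appLast J (L.modifyHead (fun s => t :: s)) := by
  intro L hL
  cases L with
  | nil => exact absurd rfl hL
  | cons x xs =>
    cases xs with
    | nil => simp [appLast]
    | cons y ys => simp [appLast]

theorem splitR_append_inert (op : Char) (J : List Tok) (hJ : ∀ t ∈ J, t ≠ Tok.sym op) :
    ∀ (T : List Tok), splitR op (T ++ J) = appLast J (splitR op T) := by
  intro T
  induction T with
  | nil =>
    rw [List.nil_append, splitR_inert op J hJ]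
    simp [splitR, appLast]
  | cons t T' ih =>
    by_cases ht : t = Tok.sym op
    · subst ht
      rw [List.cons_append]
      rw [show splitR op (Tok.sym op :: (T' ++ J)) = [] :: splitR op (T' ++ J) from by
        simp [splitR]]
      rw [show splitR op (Tok.sym op :: T') = [] :: splitR op T' from by simp [splitR]]
      rw [ih]
      cases hsp : splitR op T' with
      | nil => exact absurd hsp (splitR_ne_nil op T')
      | cons x xs => simp [appLast]
    · rw [List.cons_append]
      rw [show splitR op (t :: (T' ++ J)) =
          (splitR op (T' ++ J)).modifyHead (fun s => t :: s) from by simp [splitR, ht]]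
      rw [show splitR op (t :: T') =
          (splitR op T').modifyHead (fun s => t :: s) from by simp [splitR, ht]]
      rw [ih, modifyHead_appLast J t _ (splitR_ne_nil op T')]

theorem map_appLast (J : List Tok) (f : List Tok → Int) : ∀ (L : List (List Tok)), L ≠ [] →
    (∀ x ∈ L, f (x ++ J) = f x) → (appLast J L).map f = L.map f := by
  intro L
  induction L with
  | nil => intro h _; exact absurd rfl h
  | cons x xs ih =>
    intro _ h
    cases xs with
    | nil => simp [appLast, h x (by simp)]
    | cons y ys =>
      simp only [appLast, List.map_cons]
      rw [ih (by simp) (fun u hu => h u (by simp [hu]))]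
      simp

theorem evalE_redJ : ∀ (P : List Char), P.Nodup →
    (∀ q ∈ P, q ∈ (['+', '-', '*'] : List Char)) →
    ∀ (v : Int) (l : List (Char × Int)) (J : List Tok),
    (∀ o ∈ l.map Prod.fst, o ∈ P) → InertP J →
    evalE (listify v l ++ J) P = (redAll P (v, l)).1 := by
  intro P
  induction P using List.reverseRecOn with
  | nil =>
    intro _ _ v l J h _
    have hl : l = [] := by
      cases l with
      | nil => rfl
      | cons p t => exact absurd (h p.1 (by simp)) (by simp)
    subst hl
    rw [show listify v [] ++ J = Tok.num v :: J from by simp [listify, tailL], evalE]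
    simp [redAll]
  | append_singleton Q op ih =>
    intro hnd hPo v l J h hJ
    have hnQ : Q.Nodup ∧ op ∉ Q := by
      rw [List.nodup_append] at hnd
      exact ⟨hnd.1, fun hm => hnd.2.2 op hm op (by simp) rfl⟩
    have hop : op ∈ (['+', '-', '*'] : List Char) := hPo op (by simp)
    have hQo : ∀ q ∈ Q, q ∈ (['+', '-', '*'] : List Char) :=
      fun q hq => hPo q (by simp [hq])
    -- expose the cons form of Q ++ [op]
    cases hQ : Q ++ [op] with
    | nil => simp at hQ
    | cons p ps =>
      have hlast : (p :: ps).getLast (by simp) = op := by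
        have h1 : (p :: ps).getLast? = some op := by
          rw [← hQ]; exact List.getLast?_concat
        rwa [List.getLast?_eq_getLast, Option.some_inj] at h1
      have hdrop : (p :: ps).dropLast = Q := by
        rw [← hQ]; exact List.dropLast_concat
      rw [evalE_cons]
      rw [hlast]
      rw [hdrop]
      rw [splitToks_splitR, splitR_append_inert op J (inertP_ne_sym J hJ op hop),
        splitR_listify]
      rw [← hQ]
      -- the segments at op
      set s1 := (seg op v l).1 with hs1
      set s2 := (seg op v l).2 with hs2
      have hseg := seg_ops op l v
      have hops : ∀ c ∈ s1 :: s2, ∀ o ∈ c.2.map Prod.fst, o ∈ Q := by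
        intro c hc o ho
        have := hseg c hc o ho
        have hmem := h o this.1
        rw [List.mem_append] at hmem
        rcases hmem with hm | hm
        · exact hm
        · simp at hm; exact absurd hm this.2
      have hInertNil : InertP ([] : List Tok) := by intro c hc; simp at hc
      have hfx : ∀ x ∈ (listify s1.1 s1.2 :: s2.map (fun c => listify c.1 c.2)),
          evalE (x ++ J) Q = evalE x Q := by
        intro x hx
        simp only [List.mem_cons, List.mem_map] at hx
        rcases hx with rfl | ⟨c, hc, rfl⟩
        · rw [ih hnQ.1 hQo s1.1 s1.2 J (hops s1 (by simp)) hJ]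
          have := ih hnQ.1 hQo s1.1 s1.2 [] (hops s1 (by simp)) hInertNil
          rw [List.append_nil] at this
          rw [this]
        · rw [ih hnQ.1 hQo c.1 c.2 J (hops c (by simp [hc])) hJ]
          have := ih hnQ.1 hQo c.1 c.2 [] (hops c (by simp [hc])) hInertNil
          rw [List.append_nil] at this
          rw [this]
      rw [map_appLast J _ _ (by simp) hfx]
      have hv1 : evalE (listify s1.1 s1.2) Q = (redAll Q s1).1 := by
        have := ih hnQ.1 hQo s1.1 s1.2 [] (hops s1 (by simp)) hInertNil
        rw [List.append_nil] at this
        rw [this]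
      have hvs : s2.map (fun c => evalE (listify c.1 c.2) Q) = s2.map (fun c => (redAll Q c).1) := by
        apply List.map_congr_left
        intro c hc
        have := ih hnQ.1 hQo c.1 c.2 [] (hops c (List.mem_cons_of_mem _ hc)) hInertNil
        rw [List.append_nil] at this
        rw [this]
      -- reduce the LHS fold
      simp only [List.map_cons, List.map_map]
      -- RHS: redAll over the glued chain
      have hglue : (v, l) = glue op s1 s2 := (glue_seg op l v).symm
      have hredall : redAll (Q ++ [op]) (v, l) =
          red op (redAll Q (v, l)).1 (redAll Q (v, l)).2 := by
        simp [redAll, List.foldl_append]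
      have hflat1 : (redAll Q s1).2 = [] := by
        have := redAll_nil Q s1.2 s1.1 (hops s1 (by simp))
        simpa using this
      have hflat2 : ∀ d ∈ s2.map (redAll Q), d.2 = ([] : List (Char × Int)) := by
        intro d hd
        rw [List.mem_map] at hd
        obtain ⟨c, hc, rfl⟩ := hd
        have := redAll_nil Q c.2 c.1 (hops c (List.mem_cons_of_mem _ hc))
        simpa using this
      have hRHS : (redAll (Q ++ [op]) (v, l)).1 =
          ((s2.map (redAll Q)).map (fun d => d.1)).foldl (applyOp op) (redAll Q s1).1 := by
        rw [hredall, hglue]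
        rw [show redAll Q (glue op s1 s2) = glue op (redAll Q s1) (s2.map (redAll Q)) from
          redAll_glue Q op hnQ.2 s1 s2]
        rw [show redAll Q s1 = ((redAll Q s1).1, (redAll Q s1).2) from rfl, hflat1]
        rw [glue_flat op (s2.map (redAll Q)) (redAll Q s1).1 hflat2]
        rw [show (s2.map (redAll Q)).map (fun d => (op, d.1)) =
            ((s2.map (redAll Q)).map (fun d => d.1)).map (fun w => (op, w)) from by
          simp [List.map_map]]
        rw [red_op_fold]
      rw [hRHS]
      have hcomp : s2.map (fun c => evalE (listify c.1 c.2) Q) =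
          (s2.map (redAll Q)).map (fun d => d.1) := by
        rw [hvs, List.map_map]
        rfl
      simp only [List.map_map, Function.comp_def] at hcomp ⊢
      rw [hcomp, hv1]

def inertB (T : List Tok) : Bool :=
  T.all (fun t => match t with
    | Tok.sym c => !decide (c ∈ (['+', '-', '*'] : List Char))
    | Tok.num _ => true)

def isChainJ : List Tok → Bool
  | [Tok.num _] => true
  | Tok.num _ :: Tok.sym o :: rest =>
    if o ∈ (['+', '-', '*'] : List Char) then isChainJ rest else inertB rest
  | _ => false

theorem inertB_inertP (J : List Tok) (h : inertB J = true) : InertP J := by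
  intro c hc hops
  have := List.all_eq_true.mp h (Tok.sym c) hc
  simp [hops] at this

theorem chain_reprJ : ∀ (T : List Tok), isChainJ T = true →
    ∃ v l J, T = listify v l ++ J ∧
      (∀ o ∈ l.map Prod.fst, o ∈ (['+', '-', '*'] : List Char)) ∧ InertP J
  | [], h => by simp [isChainJ] at h
  | [Tok.num v], _ =>
      ⟨v, [], [], by simp [listify, tailL], by simp, by intro c hc; simp at hc⟩
  | [Tok.sym c], h => by simp [isChainJ] at h
  | Tok.num v :: Tok.num w :: rest, h => by simp [isChainJ] at h
  | Tok.sym c :: t :: rest, h => by simp [isChainJ] at h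
  | Tok.num v :: Tok.sym o :: rest, h => by
      rw [isChainJ] at h
      by_cases ho : o ∈ (['+', '-', '*'] : List Char)
      · rw [if_pos ho] at h
        obtain ⟨w, l, J, hrest, hops, hJ⟩ := chain_reprJ rest h
        refine ⟨v, (o, w) :: l, J, ?_, ?_, hJ⟩
        · simp [listify, tailL, hrest]
        · intro o' ho'
          simp only [List.map_cons, List.mem_cons] at ho'
          rcases ho' with ho' | ho'
          · subst ho'; exact ho
          · exact hops o' ho'
      · rw [if_neg ho] at h
        refine ⟨v, [], Tok.sym o :: rest, by simp [listify, tailL], by simp, ?_⟩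
        intro c hc hcops
        simp only [List.mem_cons] at hc
        rcases hc with hc | hc
        · cases hc; exact ho hcops
        · exact inertB_inertP rest h c hc hcops

theorem chainJ_of_chain : ∀ (T : List Tok), isChain T = true → isChainJ T = true
  | [], h => by simp [isChain] at h
  | [Tok.num v], _ => by simp [isChainJ]
  | [Tok.sym c], h => by simp [isChain] at h
  | Tok.num v :: Tok.num w :: rest, h => by simp [isChain] at h
  | Tok.sym c :: t :: rest, h => by simp [isChain] at h
  | Tok.num v :: Tok.sym o :: rest, h => by
      rw [isChain] at h
      simp only [Bool.and_eq_true, decide_eq_true_eq] at h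
      rw [isChainJ, if_pos h.1]
      exact chainJ_of_chain rest h.2

theorem chain_extend : ∀ (acc : List Tok) (x y : Int) (o : Char),
    isChain (acc ++ [Tok.num x]) = true → o ∈ (['+', '-', '*'] : List Char) →
    isChain (acc ++ [Tok.num x, Tok.sym o, Tok.num y]) = true
  | [], x, y, o, _, ho => by simp [isChain, ho]
  | [t], x, y, o, h, ho => by cases t <;> simp [isChain] at h
  | Tok.num a :: Tok.sym c :: acc', x, y, o, h, ho => by
      rw [List.cons_append, List.cons_append, isChain] at h
      simp only [Bool.and_eq_true, decide_eq_true_eq] at h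
      rw [List.cons_append, List.cons_append, isChain]
      simp only [Bool.and_eq_true, decide_eq_true_eq]
      exact ⟨h.1, chain_extend acc' x y o h.2 ho⟩
  | Tok.num a :: Tok.num b :: acc', x, y, o, h, ho => by simp [isChain] at h
  | Tok.sym c :: t :: acc', x, y, o, h, ho => by cases t <;> simp [isChain] at h

theorem chain_extendJ : ∀ (acc : List Tok) (x : Int) (c : Char) (E : List Tok),
    isChain (acc ++ [Tok.num x]) = true → c ∉ (['+', '-', '*'] : List Char) →
    inertB E = true → isChainJ (acc ++ [Tok.num x, Tok.sym c] ++ E) = true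
  | [], x, c, E, _, hc, hE => by
      rw [List.nil_append, List.cons_append, List.cons_append, List.nil_append, isChainJ,
        if_neg hc]
      exact hE
  | [t], x, c, E, h, hc, hE => by cases t <;> simp [isChain] at h
  | Tok.num a :: Tok.sym o :: acc', x, c, E, h, hc, hE => by
      rw [List.cons_append, List.cons_append, isChain] at h
      simp only [Bool.and_eq_true, decide_eq_true_eq] at h
      rw [List.cons_append, List.cons_append, List.cons_append, List.cons_append, isChainJ,
        if_pos h.1]
      exact chain_extendJ acc' x c E h.2 hc hE
  | Tok.num a :: Tok.num b :: acc', x, c, E, h, hc, hE => by simp [isChain] at h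
  | Tok.sym o :: t :: acc', x, c, E, h, hc, hE => by cases t <;> simp [isChain] at h

def finalizeTok (st : List Tok × List Char) : List Tok :=
  if st.2 ≠ [] then st.1 ++ [Tok.num (toInt st.2)] else st.1

theorem tok_junk : ∀ (r : List Char), noOps r = true → ∀ (acc : List Tok) (temp : List Char),
    ∃ E, inertB E = true ∧ finalizeTok (r.foldl tokStep (acc, temp)) = acc ++ E := by
  intro r
  induction r with
  | nil =>
    intro _ acc temp
    cases temp with
    | nil => exact ⟨[], by simp [inertB], by simp [finalizeTok]⟩
    | cons a b =>
      refine ⟨[Tok.num (toInt (a :: b))], by simp [inertB], ?_⟩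
      simp [finalizeTok]
  | cons c r' ih =>
    intro h acc temp
    have hall : (!decide (c ∈ (['+', '-', '*'] : List Char))) = true ∧ noOps r' = true := by
      simpa only [noOps, List.all_cons, Bool.and_eq_true] using h
    have hc : c ∉ (['+', '-', '*'] : List Char) ∧ noOps r' = true :=
      ⟨by simpa using hall.1, hall.2⟩
    by_cases hd : c.isDigit
    · rw [List.foldl_cons, show tokStep (acc, temp) c = (acc, temp ++ [c]) from by
        simp [tokStep, hd]]
      exact ih hc.2 acc (temp ++ [c])
    · cases temp with
      | nil =>
        rw [List.foldl_cons, show tokStep (acc, []) c = (acc ++ [Tok.sym c], []) from by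
          simp [tokStep, hd]]
        obtain ⟨E, hE, heq⟩ := ih hc.2 (acc ++ [Tok.sym c]) []
        refine ⟨Tok.sym c :: E, ?_, by simpa using heq⟩
        simp only [inertB, List.all_cons, Bool.and_eq_true] at hE ⊢
        exact ⟨by simpa using hc.1, hE⟩
      | cons a b =>
        rw [List.foldl_cons, show tokStep (acc, a :: b) c =
            (acc ++ [Tok.num (toInt (a :: b)), Tok.sym c], []) from by simp [tokStep, hd]]
        obtain ⟨E, hE, heq⟩ := ih hc.2 (acc ++ [Tok.num (toInt (a :: b)), Tok.sym c]) []
        refine ⟨Tok.num (toInt (a :: b)) :: Tok.sym c :: E, ?_, by simpa using heq⟩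
        simp only [inertB, List.all_cons, Bool.and_eq_true] at hE ⊢
        exact ⟨trivial, by simpa using hc.1, hE⟩

theorem tok_LT : ∀ (chars : List Char) (acc : List Tok) (temp : List Char),
    okE temp.isEmpty chars = true →
    (∀ x : Int, isChain (acc ++ [Tok.num x]) = true) →
    isChainJ (finalizeTok (chars.foldl tokStep (acc, temp))) = true := by
  intro chars
  induction chars with
  | nil =>
    intro acc temp h hacc
    cases temp with
    | nil => simp [okE] at h
    | cons a b =>
      simp only [List.foldl_nil, finalizeTok, ne_eq, reduceCtorEq, not_false_iff, if_pos]
      exact chainJ_of_chain _ (hacc (toInt (a :: b)))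
  | cons c r ih =>
    intro acc temp h hacc
    by_cases hd : c.isDigit
    · have hr : okE false r = true := by
        cases temp with
        | nil => simpa [okE, hd] using h
        | cons a b => simpa [okE, hd] using h
      rw [List.foldl_cons, show tokStep (acc, temp) c = (acc, temp ++ [c]) from by
        simp [tokStep, hd]]
      have hie : (temp ++ [c]).isEmpty = false := by simp
      exact ih acc (temp ++ [c]) (by rw [hie]; exact hr) hacc
    · cases temp with
      | nil => simp [okE, hd] at h
      | cons a b =>
        rw [show (a :: b).isEmpty = false from by simp, okE] at h
        rw [if_neg (by simp [hd]), if_neg (by simp)] at h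
        rw [List.foldl_cons, show tokStep (acc, a :: b) c =
            (acc ++ [Tok.num (toInt (a :: b)), Tok.sym c], []) from by simp [tokStep, hd]]
        by_cases hcop : c ∈ (['+', '-', '*'] : List Char)
        · rw [if_pos (by simpa using hcop)] at h
          apply ih _ [] (by simpa using h)
          intro y
          have := chain_extend acc (toInt (a :: b)) y c (hacc (toInt (a :: b))) hcop
          simpa using this
        · rw [if_neg (by simpa using hcop)] at h
          obtain ⟨E, hE, heq⟩ := tok_junk r h (acc ++ [Tok.num (toInt (a :: b)), Tok.sym c]) []
          rw [heq]
          have := chain_extendJ acc (toInt (a :: b)) c E (hacc (toInt (a :: b))) hcop hE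
          simpa using this

theorem tok_chain (s : List Char) (h : okE true s = true) :
    isChainJ (tokenize s) = true := by
  have := tok_LT s [] [] (by simpa using h) (by intro x; simp [isChain])
  simpa [tokenize, finalizeTok] using this

theorem foldl_max_congr {α : Type} : ∀ (L : List α) (f g : α → Int) (a : Int),
    (∀ x ∈ L, f x = g x) →
    L.foldl (fun m x => max m (f x)) a = L.foldl (fun m x => max m (g x)) a := by
  intro L
  induction L with
  | nil => intro f g a _; rfl
  | cons x t ih =>
    intro f g a h
    simp only [List.foldl_cons]
    rw [h x (by simp), ih f g _ (fun y hy => h y (List.mem_cons_of_mem _ hy))]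

theorem per_perm (p : List Char) (hnd : p.Nodup)
    (hsub : ∀ o ∈ (['+', '-', '*'] : List Char), o ∈ p)
    (hsup : ∀ q ∈ p, q ∈ (['+', '-', '*'] : List Char))
    (v : Int) (l : List (Char × Int)) (J : List Tok)
    (hops : ∀ o ∈ l.map Prod.fst, o ∈ (['+', '-', '*'] : List Char)) (hJ : InertP J) :
    (calculate p (listify v l ++ J)).getD 0 = |evalE (listify v l ++ J) p| := by
  rw [calculate_listifyJ p v l J hsup hJ,
    evalE_redJ p hnd hsup v l J (fun o ho => hsub o (hops o ho)) hJ]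
  rfl

set_option maxRecDepth 10000 in
theorem solution_spec : Claim_equal_solution := by
  intro expression _ hpre
  show solution expression = solution_alt expression
  have hch := tok_chain expression.toList hpre
  obtain ⟨v, l, J, hT, hops, hJ⟩ := chain_reprJ _ hch
  rw [solution, solution_alt, hT]
  apply foldl_max_congr permsA
    (fun p => (calculate p (listify v l ++ J)).getD 0)
    (fun p => |evalE (listify v l ++ J) p|) 0
  intro p hp
  simp only [permsA, List.mem_cons, List.not_mem_nil, or_false] at hp
  rcases hp with rfl | rfl | rfl | rfl | rfl | rfl <;>
    exact per_perm _ (by decide)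
      (by intro o ho
          simp only [List.mem_cons, List.not_mem_nil, or_false] at ho ⊢
          rcases ho with rfl | rfl | rfl <;> simp)
      (by intro o ho
          simp only [List.mem_cons, List.not_mem_nil, or_false] at ho ⊢
          rcases ho with rfl | rfl | rfl <;> simp)
      v l J hops hJ
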